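-- pv_equiv track=rewrite | github.com/aeineeuq/SheCodes-Projects | Python/parity_project/starter/parity.py | add_row
-- ===== SOURCE A (Python) =====
-- def add_row(grid):
--     """Adds a new row to a grid. For each column, if there is an even
--     number of X characters, a O is added to the column, otherwise a X is added
--     to the column.
--     Arguments:
--         grid: A list of lists, where each sublist represents a row in a grid.
--     Returns:
--         The same grid, with a new row added.
--     """
--     new_row = []                        # define variable to store values
--     if grid == []:
--         return grid                     # check if grid is a list of lists
--
--     else:
--         for i in range(len(grid[0])):   # loop through chars/items in list
--             xcount = 0                  # start counter
--             for row in grid: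
--                 if row[i] == "X":       # if X, add to counter
--                     xcount += 1
--             if xcount % 2 == 0:         # if even (divisible by 2)
--                 new_row.append('O')     # add O to new row
--             else:                       # if not divisible by 2
--                 new_row.append('X')     # add X to new row
--
--         grid.append(new_row)            # add new row to grid
--
--     return grid
-- ===== SOURCE B (Python) =====
-- def add_row(grid):
--     """Appends the column-parity row; single row-major pass maintaining a
--     running per-column parity toggle (A instead counts X's per column).
--     Like A, mutates grid in place (appends the new row) and returns it."""
--     if grid == []:
--         return grid
--     n = len(grid[0])
--     new_row = ['O'] * n
--     for row in grid:
--         for i in range(n):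
--             if row[i] == 'X':
--                 new_row[i] = 'X' if new_row[i] == 'O' else 'O'
--     grid.append(new_row)
--     return grid
-- ===== Notes on version B (the rewrite author's own statement) =====
-- stated objective: alternative
-- what changed: Replaces the column-outer count-all-X-then-mod-2 nested scan by a single row-major pass that maintains a running per-column parity toggle in a preallocated row.
import Mathlib
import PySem

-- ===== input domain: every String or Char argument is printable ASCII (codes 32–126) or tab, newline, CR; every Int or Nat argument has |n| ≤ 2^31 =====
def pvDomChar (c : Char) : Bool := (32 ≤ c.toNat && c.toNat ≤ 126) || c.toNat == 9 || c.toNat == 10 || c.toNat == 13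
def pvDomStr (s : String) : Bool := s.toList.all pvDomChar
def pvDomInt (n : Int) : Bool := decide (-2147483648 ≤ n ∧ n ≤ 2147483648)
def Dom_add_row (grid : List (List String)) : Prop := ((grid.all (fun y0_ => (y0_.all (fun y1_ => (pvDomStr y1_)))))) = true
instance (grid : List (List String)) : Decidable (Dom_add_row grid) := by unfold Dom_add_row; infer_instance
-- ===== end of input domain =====

-- B replaces A's column-outer count-then-mod-2 scan by a single row-major pass keeping a
-- running per-column parity toggle; same cost, different decomposition. Both A and B mutate
-- the Python argument in place (append the new row); the equivalence proved is about the
-- returned value.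

-- ===== PORT A =====
def add_row (grid : List (List String)) : List (List String) :=
  if grid = [] then grid
  else
    let new_row := (PySem.List.pyRange 0 ((grid.headD []).length : Int) 1).foldl
      (fun nr i =>
        let xcount := grid.foldl
          (fun c row => if PySem.List.pyGetD row i "" = "X" then c + 1 else c) (0 : Int)
        if xcount % 2 = 0 then nr ++ ["O"] else nr ++ ["X"]) []
    grid ++ [new_row]

-- ===== PORT B =====
def add_row_alt (grid : List (List String)) : List (List String) :=
  if grid = [] then grid
  else
    let n := (grid.headD []).length
    let new_row := grid.foldl (fun nr row =>
      (PySem.List.pyRange 0 (n : Int) 1).foldl (fun nr i =>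
        if PySem.List.pyGetD row i "" = "X" then
          PySem.List.pySetD nr i (if PySem.List.pyGetD nr i "" = "O" then "X" else "O")
        else nr) nr) (List.replicate n "O")
    grid ++ [new_row]

-- ===== PRECONDITION & SPEC =====
-- Pre_ excludes ragged grids in which some row is shorter than the first row: there
-- row[i] raises IndexError in the Python A (and in B as well).
def Pre_add_row (grid : List (List String)) : Prop :=
  ∀ row ∈ grid, (grid.headD []).length ≤ row.length
instance (grid : List (List String)) : Decidable (Pre_add_row grid) := by
  unfold Pre_add_row; infer_instance

def pvWitness_add_row : List (List String) := [["X", "O"], ["O", "X"]]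

def Spec_add_row (grid : List (List String)) (out : List (List String)) : Prop := out = add_row_alt grid
instance (grid : List (List String)) (out : List (List String)) : Decidable (Spec_add_row grid out) := by unfold Spec_add_row; infer_instance

-- ===== CLAIM (what is proved, stated in full; the proofs are below) =====
def Claim_equal_add_row : Prop := ∀ (grid : List (List String)), Dom_add_row grid → Pre_add_row grid → Spec_add_row grid (add_row grid)

-- ===== LEMMAS AND PROOFS =====

def pvFlip (s : String) : String := if s = "O" then "X" else "O"

def pvUpd (row : List String) (g : Nat → String) : Nat → String :=
  fun k => if row.getD k "" = "X" then pvFlip (g k) else g k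

def pvCnt (rows : List (List String)) (k : Nat) : Int :=
  rows.foldl (fun c row => if row.getD k "" = "X" then c + 1 else c) 0

def pvStep (row : List String) (nr : List String) (k : Nat) : List String :=
  if row.getD k "" = "X" then nr.set k (pvFlip (nr.getD k "")) else nr

lemma foldl_snoc {α β : Type} (g : β → α) (l : List β) (acc : List α) :
    l.foldl (fun nr i => nr ++ [g i]) acc = acc ++ l.map g := by
  induction l generalizing acc with
  | nil => simp
  | cons x xs ih => simp [List.foldl_cons, ih]

lemma cnt_shift (k : Nat) (rows : List (List String)) (c : Int) :
    rows.foldl (fun c row => if row.getD k "" = "X" then c + 1 else c) c = c + pvCnt rows k := by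
  induction rows generalizing c with
  | nil => simp [pvCnt]
  | cons r rs ih =>
      simp only [pvCnt, List.foldl_cons]
      rw [ih, ih]
      split <;> omega

lemma map_range_getD (n m : Nat) (g : Nat → String) (h : m < n) :
    ((List.range n).map g).getD m "" = g m := by
  rw [List.getD_eq_getElem?_getD]
  simp [h]

lemma map_range_set (n m : Nat) (g : Nat → String) (v : String) (_h : m < n) :
    ((List.range n).map g).set m v = (List.range n).map (fun k => if k = m then v else g k) := by
  apply List.ext_getElem
  · simp
  · intro i h1 h2
    simp at h1
    simp only [List.getElem_set, List.getElem_map, List.getElem_range]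
    by_cases him : m = i
    · subst him; simp
    · rw [if_neg him, if_neg (fun hh => him (hh.symm))]

lemma inner_aux (row : List String) (n : Nat) (g : Nat → String) :
    ∀ m ≤ n,
      (List.range m).foldl (pvStep row) ((List.range n).map g)
        = (List.range n).map (fun k => if k < m then pvUpd row g k else g k) := by
  intro m
  induction m with
  | zero => intro _; simp
  | succ m ih =>
      intro hm
      have hmn : m < n := by omega
      rw [List.range_succ, List.foldl_append, ih (by omega)]
      simp only [List.foldl_cons, List.foldl_nil, pvStep]
      rw [map_range_getD n m _ hmn]
      have hgm : (if m < m then pvUpd row g m else g m) = g m := by simp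
      rw [hgm]
      by_cases hx : row.getD m "" = "X"
      · rw [if_pos hx, map_range_set n m _ _ hmn]
        apply List.map_congr_left
        intro k hk
        simp only [List.mem_range] at hk
        by_cases hkm : k = m
        · subst hkm
          rw [if_pos rfl, if_pos (Nat.lt_succ_self k)]
          unfold pvUpd; rw [if_pos hx]
        · rw [if_neg hkm]
          by_cases hlt : k < m
          · rw [if_pos hlt, if_pos (by omega : k < m + 1)]
          · rw [if_neg hlt, if_neg (by omega : ¬ k < m + 1)]
      · rw [if_neg hx]
        apply List.map_congr_left
        intro k hk
        by_cases hkm : k = m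
        · subst hkm
          rw [if_neg (lt_irrefl k), if_pos (Nat.lt_succ_self k)]
          unfold pvUpd; rw [if_neg hx]
        · by_cases hlt : k < m
          · rw [if_pos hlt, if_pos (by omega : k < m + 1)]
          · rw [if_neg hlt, if_neg (by omega : ¬ k < m + 1)]

lemma inner_full (row : List String) (n : Nat) (g : Nat → String) :
    (List.range n).foldl (pvStep row) ((List.range n).map g) = (List.range n).map (pvUpd row g) := by
  rw [inner_aux row n g n le_rfl]
  apply List.map_congr_left
  intro k hk
  simp only [List.mem_range] at hk
  simp [hk]

lemma pvFlip_pvFlip (s : String) (hs : s = "O" ∨ s = "X") : pvFlip (pvFlip s) = s := by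
  rcases hs with h | h <;> subst h <;> decide

lemma upd_range (row : List String) (g : Nat → String) (hg : ∀ k, g k = "O" ∨ g k = "X") :
    ∀ k, pvUpd row g k = "O" ∨ pvUpd row g k = "X" := by
  intro k
  unfold pvUpd
  rcases hg k with h | h <;> rw [h] <;> split <;> simp [pvFlip]

lemma outer_aux (n : Nat) :
    ∀ (rows : List (List String)) (g : Nat → String), (∀ k, g k = "O" ∨ g k = "X") →
      rows.foldl (fun nr row => (List.range n).foldl (pvStep row) nr) ((List.range n).map g)
        = (List.range n).map (fun k => if pvCnt rows k % 2 = 0 then g k else pvFlip (g k)) := by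
  intro rows
  induction rows with
  | nil => intro g _; simp [pvCnt]
  | cons row rs ih =>
      intro g hg
      simp only [List.foldl_cons]
      rw [inner_full row n g, ih (pvUpd row g) (upd_range row g hg)]
      apply List.map_congr_left
      intro k _
      have hcnt : pvCnt (row :: rs) k
          = (if row.getD k "" = "X" then (1 : Int) else 0) + pvCnt rs k := by
        simp only [pvCnt, List.foldl_cons]
        rw [cnt_shift]
        split <;> simp [pvCnt]
      rw [hcnt]
      unfold pvUpd
      by_cases hx : row.getD k "" = "X"
      · rw [if_pos hx]
        by_cases hc : pvCnt rs k % 2 = 0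
        · have h1 : ¬ ((if row.getD k "" = "X" then (1 : Int) else 0) + pvCnt rs k) % 2 = 0 := by
            rw [if_pos hx]; omega
          rw [if_pos hc, if_neg h1]
        · have h1 : ((if row.getD k "" = "X" then (1 : Int) else 0) + pvCnt rs k) % 2 = 0 := by
            rw [if_pos hx]; omega
          rw [if_neg hc, if_pos h1, pvFlip_pvFlip (g k) (hg k)]
      · rw [if_neg hx]
        have h1 : ((if row.getD k "" = "X" then (1 : Int) else 0) + pvCnt rs k) % 2
            = pvCnt rs k % 2 := by rw [if_neg hx]; omega
        rw [h1]

lemma new_row_eq (grid : List (List String)) :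
    grid.foldl (fun nr row =>
      (PySem.List.pyRange 0 ((grid.headD []).length : Int) 1).foldl (fun nr i =>
        if PySem.List.pyGetD row i "" = "X" then
          PySem.List.pySetD nr i (if PySem.List.pyGetD nr i "" = "O" then "X" else "O")
        else nr) nr) (List.replicate (grid.headD []).length "O")
      = (PySem.List.pyRange 0 ((grid.headD []).length : Int) 1).foldl
          (fun nr i =>
            let xcount := grid.foldl
              (fun c row => if PySem.List.pyGetD row i "" = "X" then c + 1 else c) (0 : Int)
            if xcount % 2 = 0 then nr ++ ["O"] else nr ++ ["X"]) [] := by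
  set n := (grid.headD []).length with hn
  -- A's side: fold-append is a map over the range
  have hA : (PySem.List.pyRange 0 (n : Int) 1).foldl
      (fun nr i =>
        let xcount := grid.foldl
          (fun c row => if PySem.List.pyGetD row i "" = "X" then c + 1 else c) (0 : Int)
        if xcount % 2 = 0 then nr ++ ["O"] else nr ++ ["X"]) []
      = (List.range n).map (fun k => if pvCnt grid k % 2 = 0 then "O" else "X") := by
    have hf : (fun (nr : List String) (i : Int) =>
        let xcount := grid.foldl
          (fun c row => if PySem.List.pyGetD row i "" = "X" then c + 1 else c) (0 : Int)
        if xcount % 2 = 0 then nr ++ ["O"] else nr ++ ["X"])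
        = fun nr i => nr ++ [if (grid.foldl
            (fun c row => if PySem.List.pyGetD row i "" = "X" then c + 1 else c) (0 : Int)) % 2 = 0
            then "O" else "X"] := by
      funext nr i; simp only []; split <;> simp_all
    rw [hf, foldl_snoc, List.nil_append, PySem.List.pyRange_zero_nat, List.map_map]
    apply List.map_congr_left
    intro k _
    simp [pvCnt, Function.comp]
  -- B's side: the nested parity-toggle fold is the same parity map
  have hB : grid.foldl (fun nr row =>
      (PySem.List.pyRange 0 (n : Int) 1).foldl (fun nr i =>
        if PySem.List.pyGetD row i "" = "X" then
          PySem.List.pySetD nr i (if PySem.List.pyGetD nr i "" = "O" then "X" else "O")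
        else nr) nr) (List.replicate n "O")
      = (List.range n).map (fun k => if pvCnt grid k % 2 = 0 then "O" else "X") := by
    have hstep : (fun (nr : List String) (row : List String) =>
        (PySem.List.pyRange 0 (n : Int) 1).foldl (fun nr i =>
          if PySem.List.pyGetD row i "" = "X" then
            PySem.List.pySetD nr i (if PySem.List.pyGetD nr i "" = "O" then "X" else "O")
          else nr) nr)
        = fun nr row => (List.range n).foldl (pvStep row) nr := by
      funext nr row
      rw [PySem.List.pyRange_zero_nat, List.foldl_map]
      have : (fun (nr : List String) (k : Nat) =>
          if PySem.List.pyGetD row ((k : Nat) : Int) "" = "X" then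
            PySem.List.pySetD nr ((k : Nat) : Int) (if PySem.List.pyGetD nr ((k : Nat) : Int) "" = "O" then "X" else "O")
          else nr) = pvStep row := by
        funext nr k
        simp [pvStep, pvFlip, List.getD_eq_getElem?_getD]
      rw [this]
    have hinit : List.replicate n "O" = (List.range n).map (fun _ => "O") := by
      simp
    rw [hstep, hinit, outer_aux n grid (fun _ => "O") (fun _ => Or.inl rfl)]
    apply List.map_congr_left
    intro k _
    split <;> simp [pvFlip]
  rw [hA, hB]

-- ===== VERDICT (by name: the statement is the Claim_ definition above) =====
theorem add_row_spec : Claim_equal_add_row := by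
  intro grid _ _
  unfold Spec_add_row add_row add_row_alt
  by_cases h : grid = []
  · simp [h]
  · simp only [if_neg h]
    rw [new_row_eq grid]
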